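-- pv_equiv track=rewrite | github.com/SammysStacks/Stress-Analysis-Head | helperFiles/dataAcquisitionAndAnalysis/biolectricProtocols/__oldAnalysis/bvpAnalysis_old2.py | find_pulse_end
-- ===== SOURCE A (Python) =====
-- def find_pulse_end(systolic_peak, dicrotic_notch_ind, diastolic_peak, first_derivative):
--     if diastolic_peak is not None:
--         start_idx = diastolic_peak
--     elif dicrotic_notch_ind is not None:
--         # only if the diastolic peak is not identified, then we start with dicrotic notch
--         start_idx = dicrotic_notch_ind
--     else:
--         # if neither dicrotic notch nor diastolic peak is identified, we fallback to systolic peak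
--         start_idx = systolic_peak
--
--     for i in range(start_idx, len(first_derivative)):
--         if first_derivative[i] > 0 and first_derivative[i - 1] < 0:
--             return i
--     return None
-- ===== SOURCE B (Python) =====
-- def find_pulse_end(systolic_peak, dicrotic_notch_ind, diastolic_peak, first_derivative):
--     if diastolic_peak is not None:
--         start_idx = diastolic_peak
--     elif dicrotic_notch_ind is not None:
--         start_idx = dicrotic_notch_ind
--     else:
--         start_idx = systolic_peak
--
--     n = len(first_derivative)
--     # precompute the full crossing table (index i is a crossing iff derivative
--     # goes from negative at i-1, wrapping at i=0, to positive at i)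
--     crossings = [i for i in range(n)
--                  if first_derivative[i] > 0 and first_derivative[i - 1] < 0]
--     # bounded lookup: first tabulated crossing at or after the start index
--     return next((i for i in crossings if i >= start_idx), None)
-- ===== Notes on version B (the rewrite author's own statement) =====
-- stated objective: alternative
-- what changed: B precomputes the full table of negative-to-positive crossing indices in one comprehension and then does a bounded lookup for the first tabulated index >= the start index, instead of A's short-circuiting scan from the start index with wraparound indexing.
-- intended difference: When the effective start index is negative and the wrapped tail contains a crossing, A returns that negative loop index (Python negative-index wraparound), while B returns the first actual crossing index >= 0, the intended pulse-end index. — e.g. on find_pulse_end(0, none, some (-1), [-1, 1]): A returns some (-1), B returns some 1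
import Mathlib
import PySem

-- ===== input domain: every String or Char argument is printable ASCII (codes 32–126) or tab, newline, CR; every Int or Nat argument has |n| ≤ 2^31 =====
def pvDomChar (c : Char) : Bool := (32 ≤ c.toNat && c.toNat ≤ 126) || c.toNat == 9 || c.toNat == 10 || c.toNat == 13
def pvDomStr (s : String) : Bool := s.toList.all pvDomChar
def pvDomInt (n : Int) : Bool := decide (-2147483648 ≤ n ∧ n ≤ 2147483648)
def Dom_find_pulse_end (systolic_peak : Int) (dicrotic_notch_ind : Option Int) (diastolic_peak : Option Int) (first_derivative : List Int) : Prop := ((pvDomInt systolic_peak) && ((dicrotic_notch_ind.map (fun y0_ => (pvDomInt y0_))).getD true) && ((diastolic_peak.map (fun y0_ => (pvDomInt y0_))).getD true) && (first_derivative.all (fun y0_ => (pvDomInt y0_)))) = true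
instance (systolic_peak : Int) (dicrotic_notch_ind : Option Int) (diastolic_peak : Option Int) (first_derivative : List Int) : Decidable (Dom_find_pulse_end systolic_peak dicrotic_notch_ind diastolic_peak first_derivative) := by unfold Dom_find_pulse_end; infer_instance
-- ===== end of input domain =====

-- B replaces A's short-circuiting scan by a precomputed crossing table plus a bounded lookup
-- (objective: alternative decomposition, same cost); on a negative start index A's Python
-- negative-index wraparound can return a negative "index", where B returns the first real
-- crossing index (see D_ below).

-- ===== PORT A =====
-- A's early-exit for-loop over range(start_idx, len(first_derivative))
def pvScanA (fd : List Int) : List Int → Option Int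
  | [] => none
  | i :: rest =>
      if 0 < PySem.List.pyGetD fd i 0 ∧ PySem.List.pyGetD fd (i - 1) 0 < 0 then some i
      else pvScanA fd rest

def find_pulse_end (systolic_peak : Int) (dicrotic_notch_ind : Option Int) (diastolic_peak : Option Int) (first_derivative : List Int) : Option Int :=
  let start_idx : Int :=
    match diastolic_peak with
    | some v => v
    | none =>
      match dicrotic_notch_ind with
      | some v => v
      | none => systolic_peak
  pvScanA first_derivative (PySem.List.pyRange start_idx (first_derivative.length : Int) 1)

-- ===== PORT B =====
-- crossing predicate of B's table comprehension (index wraps to -1 at i = 0, as in Python)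
def pvCross (fd : List Int) (j : Nat) : Bool :=
  decide (0 < PySem.List.pyGetD fd (j : Int) 0) && decide (PySem.List.pyGetD fd ((j : Int) - 1) 0 < 0)

def find_pulse_end_alt (systolic_peak : Int) (dicrotic_notch_ind : Option Int) (diastolic_peak : Option Int) (first_derivative : List Int) : Option Int :=
  let start_idx : Int :=
    match diastolic_peak with
    | some v => v
    | none =>
      match dicrotic_notch_ind with
      | some v => v
      | none => systolic_peak
  let crossings : List Nat := (List.range first_derivative.length).filter (pvCross first_derivative)
  (crossings.find? (fun j : Nat => decide (start_idx ≤ (j : Int)))).map (fun j : Nat => (j : Int))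

-- ===== PRECONDITION & SPEC =====
-- Pre_ excludes exactly the inputs where A raises IndexError: an effective start index below
-- -len(first_derivative), or equal to -len with a positive first element (there the loop
-- evaluates first_derivative[-len-1]).
def Pre_find_pulse_end (systolic_peak : Int) (dicrotic_notch_ind : Option Int) (diastolic_peak : Option Int) (first_derivative : List Int) : Prop :=
  -(first_derivative.length : Int) ≤ diastolic_peak.getD (dicrotic_notch_ind.getD systolic_peak) ∧
    ¬ (0 < first_derivative.length ∧ diastolic_peak.getD (dicrotic_notch_ind.getD systolic_peak) = -(first_derivative.length : Int) ∧ 0 < first_derivative.headD 0)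
instance (systolic_peak : Int) (dicrotic_notch_ind : Option Int) (diastolic_peak : Option Int) (first_derivative : List Int) : Decidable (Pre_find_pulse_end systolic_peak dicrotic_notch_ind diastolic_peak first_derivative) := by unfold Pre_find_pulse_end; infer_instance

def pvWitness_find_pulse_end : Int × Option Int × Option Int × List Int := (0, none, none, [-1, 1])

-- On inputs whose effective start index is negative and whose wrapped tail contains a
-- negative-to-positive crossing, A returns that NEGATIVE loop index (an artefact of Python's
-- negative-index wraparound), while B returns the first actual crossing index ≥ 0, which is
-- the intended pulse-end index.
def D_find_pulse_end (systolic_peak : Int) (dicrotic_notch_ind : Option Int) (diastolic_peak : Option Int) (first_derivative : List Int) : Prop :=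
  let s := diastolic_peak.getD (dicrotic_notch_ind.getD systolic_peak) ;
  s < 0 ∧ ∃ i ∈ PySem.List.pyRange (s ⊔ -(first_derivative.length : Int)) 0 1,
    0 < PySem.List.pyGetD first_derivative i 0 ∧ PySem.List.pyGetD first_derivative (i - 1) 0 < 0
instance (systolic_peak : Int) (dicrotic_notch_ind : Option Int) (diastolic_peak : Option Int) (first_derivative : List Int) : Decidable (D_find_pulse_end systolic_peak dicrotic_notch_ind diastolic_peak first_derivative) := by unfold D_find_pulse_end; infer_instance

def Spec_find_pulse_end (systolic_peak : Int) (dicrotic_notch_ind : Option Int) (diastolic_peak : Option Int) (first_derivative : List Int) (out : Option Int) : Prop := ¬ D_find_pulse_end systolic_peak dicrotic_notch_ind diastolic_peak first_derivative → out = find_pulse_end_alt systolic_peak dicrotic_notch_ind diastolic_peak first_derivative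
instance (systolic_peak : Int) (dicrotic_notch_ind : Option Int) (diastolic_peak : Option Int) (first_derivative : List Int) (out : Option Int) : Decidable (Spec_find_pulse_end systolic_peak dicrotic_notch_ind diastolic_peak first_derivative out) := by unfold Spec_find_pulse_end; infer_instance

def pvDiffWitness_find_pulse_end : Int × Option Int × Option Int × List Int := (0, none, some (-1), [-1, 1])
def pvDiffWitnessOut_find_pulse_end : (Option Int) × (Option Int) := (some (-1), some 1)

-- ===== CLAIM (what is proved, stated in full; the proofs are below) =====
def Claim_unchanged_find_pulse_end : Prop := ∀ (systolic_peak : Int) (dicrotic_notch_ind : Option Int) (diastolic_peak : Option Int) (first_derivative : List Int), Dom_find_pulse_end systolic_peak dicrotic_notch_ind diastolic_peak first_derivative → Pre_find_pulse_end systolic_peak dicrotic_notch_ind diastolic_peak first_derivative → Spec_find_pulse_end systolic_peak dicrotic_notch_ind diastolic_peak first_derivative (find_pulse_end systolic_peak dicrotic_notch_ind diastolic_peak first_derivative)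
def Claim_changed_find_pulse_end : Prop := Dom_find_pulse_end (pvDiffWitness_find_pulse_end.1) (pvDiffWitness_find_pulse_end.2.1) (pvDiffWitness_find_pulse_end.2.2.1) (pvDiffWitness_find_pulse_end.2.2.2) ∧ Pre_find_pulse_end (pvDiffWitness_find_pulse_end.1) (pvDiffWitness_find_pulse_end.2.1) (pvDiffWitness_find_pulse_end.2.2.1) (pvDiffWitness_find_pulse_end.2.2.2) ∧ D_find_pulse_end (pvDiffWitness_find_pulse_end.1) (pvDiffWitness_find_pulse_end.2.1) (pvDiffWitness_find_pulse_end.2.2.1) (pvDiffWitness_find_pulse_end.2.2.2) ∧ find_pulse_end (pvDiffWitness_find_pulse_end.1) (pvDiffWitness_find_pulse_end.2.1) (pvDiffWitness_find_pulse_end.2.2.1) (pvDiffWitness_find_pulse_end.2.2.2) = pvDiffWitnessOut_find_pulse_end.1 ∧ find_pulse_end_alt (pvDiffWitness_find_pulse_end.1) (pvDiffWitness_find_pulse_end.2.1) (pvDiffWitness_find_pulse_end.2.2.1) (pvDiffWitness_find_pulse_end.2.2.2) = pvDiffWitnessOut_find_pulse_end.2 ∧ pvDiffWitnessOut_find_pulse_end.1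 ≠ pvDiffWitnessOut_find_pulse_end.2
def Claim_exact_find_pulse_end : Prop := ∀ (systolic_peak : Int) (dicrotic_notch_ind : Option Int) (diastolic_peak : Option Int) (first_derivative : List Int), Dom_find_pulse_end systolic_peak dicrotic_notch_ind diastolic_peak first_derivative → Pre_find_pulse_end systolic_peak dicrotic_notch_ind diastolic_peak first_derivative → D_find_pulse_end systolic_peak dicrotic_notch_ind diastolic_peak first_derivative → find_pulse_end systolic_peak dicrotic_notch_ind diastolic_peak first_derivative ≠ find_pulse_end_alt systolic_peak dicrotic_notch_ind diastolic_peak first_derivative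

-- ===== LEMMAS AND PROOFS =====

-- the Int-level crossing condition both ports decide
def pvCondI (fd : List Int) (i : Int) : Bool :=
  decide (0 < PySem.List.pyGetD fd i 0) && decide (PySem.List.pyGetD fd (i - 1) 0 < 0)

theorem pvScanA_eq_find? (fd : List Int) (l : List Int) :
    pvScanA fd l = l.find? (pvCondI fd) := by
  induction l with
  | nil => rfl
  | cons i rest ih =>
      simp only [pvScanA, List.find?_cons, pvCondI]
      split_ifs with h
      · simp [h.1, h.2]
      · rcases not_and_or.mp h with h1 | h1 <;> simp [h1, ih]

theorem pvCross_eq (fd : List Int) (j : Nat) : pvCross fd j = pvCondI fd (j : Int) := rfl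

theorem find?_eq_none_of_all {α : Type} (l : List α) (p : α → Bool)
    (h : ∀ x ∈ l, p x = false) : l.find? p = none := by
  rw [List.find?_eq_none]
  intro x hx
  simp [h x hx]

-- membership-congruence for find?
theorem find?_congr_mem {α : Type} (l : List α) (p q : α → Bool)
    (h : ∀ x ∈ l, p x = q x) : l.find? p = l.find? q := by
  induction l with
  | nil => rfl
  | cons a t ih =>
      simp only [List.find?_cons, h a (by simp)]
      cases hq : q a <;> simp [ih (fun x hx => h x (by simp [hx]))]

-- B's lookup over the full crossing table equals a filtered-find? over pyRange 0 n
theorem alt_as_pyRange (fd : List Int) (s : Int) :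
    ((((List.range fd.length).filter (pvCross fd)).find? (fun j : Nat => decide (s ≤ (j : Int)))).map (fun j : Nat => (j : Int)))
      = (PySem.List.pyRange 0 (fd.length : Int) 1).find? (fun i => pvCondI fd i && decide (s ≤ i)) := by
  rw [List.find?_filter, PySem.List.pyRange_zero_nat, List.find?_map]
  congr 1
  apply find?_congr_mem
  intro j _
  simp only [Function.comp, pvCross_eq]
  simp


-- shifting the start of the scan into the predicate (nonnegative start)
theorem find?_pyRange_shift (c : Int → Bool) (s n : Int) (hs : 0 ≤ s) :
    (PySem.List.pyRange s n 1).find? c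
      = (PySem.List.pyRange 0 n 1).find? (fun i => c i && decide (s ≤ i)) := by
  rcases le_or_gt s n with h | h
  · rw [PySem.List.pyRange_one_append 0 s n hs h, List.find?_append]
    have h1 : (PySem.List.pyRange 0 s 1).find? (fun i => c i && decide (s ≤ i)) = none := by
      apply find?_eq_none_of_all
      intro i hi
      have := PySem.List.mem_pyRange_one.mp hi
      simp [show ¬ (s ≤ i) by omega]
    have h2 : (PySem.List.pyRange s n 1).find? (fun i => c i && decide (s ≤ i))
        = (PySem.List.pyRange s n 1).find? c := by
      apply find?_congr_mem
      intro i hi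
      have := PySem.List.mem_pyRange_one.mp hi
      simp [show s ≤ i from this.1]
    rw [h1, h2, Option.none_or]
  · rw [PySem.List.pyRange_one_eq_nil (le_of_lt h)]
    symm
    apply find?_eq_none_of_all
    intro i hi
    have := PySem.List.mem_pyRange_one.mp hi
    simp [show ¬ (s ≤ i) by omega]

-- D_'s crossing condition is exactly pvCondI
theorem pvCondI_true_iff (fd : List Int) (i : Int) :
    pvCondI fd i = true ↔
      (0 < PySem.List.pyGetD fd i 0 ∧ PySem.List.pyGetD fd (i - 1) 0 < 0) := by
  simp [pvCondI]

-- core agreement lemma, with the effective start index abstracted out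
theorem pv_main (s : Int) (fd : List Int)
    (hnD : ¬ (s < 0 ∧ ∃ i ∈ PySem.List.pyRange s 0 1,
        0 < PySem.List.pyGetD fd i 0 ∧ PySem.List.pyGetD fd (i - 1) 0 < 0)) :
    pvScanA fd (PySem.List.pyRange s (fd.length : Int) 1)
      = ((((List.range fd.length).filter (pvCross fd)).find? (fun j : Nat => decide (s ≤ (j : Int)))).map (fun j : Nat => (j : Int))) := by
  rw [alt_as_pyRange, pvScanA_eq_find?]
  rcases le_or_gt 0 s with hs | hs
  · exact find?_pyRange_shift _ s _ hs
  · -- negative start: the wrapped tail has no crossing (¬D_), so A reduces to the scan from 0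
    have hsplit : PySem.List.pyRange s (fd.length : Int) 1
        = PySem.List.pyRange s 0 1 ++ PySem.List.pyRange 0 (fd.length : Int) 1 :=
      PySem.List.pyRange_one_append s 0 _ (le_of_lt hs) (by positivity)
    rw [hsplit, List.find?_append]
    have hleft : (PySem.List.pyRange s 0 1).find? (pvCondI fd) = none := by
      apply find?_eq_none_of_all
      intro i hi
      by_contra hcond
      exact hnD ⟨hs, i, hi, (pvCondI_true_iff fd i).mp (by revert hcond; cases pvCondI fd i <;> simp)⟩
    rw [hleft, Option.none_or]
    symm
    apply find?_congr_mem
    intro i hi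
    have := PySem.List.mem_pyRange_one.mp hi
    simp [show s ≤ i by omega]


-- the effective start index (proof-side abbreviation of the shared fallback chain)
def pvStart (sp : Int) (dn dp : Option Int) : Int :=
  match dp with
  | some v => v
  | none =>
    match dn with
    | some v => v
    | none => sp

theorem A_eq (sp : Int) (dn dp : Option Int) (fd : List Int) :
    find_pulse_end sp dn dp fd
      = pvScanA fd (PySem.List.pyRange (pvStart sp dn dp) (fd.length : Int) 1) := by
  rcases dp with _ | v <;> rcases dn with _ | w <;> rfl

theorem B_eq (sp : Int) (dn dp : Option Int) (fd : List Int) :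
    find_pulse_end_alt sp dn dp fd
      = ((((List.range fd.length).filter (pvCross fd)).find? (fun j : Nat => decide (pvStart sp dn dp ≤ (j : Int)))).map (fun j : Nat => (j : Int))) := by
  rcases dp with _ | v <;> rcases dn with _ | w <;>
    (unfold find_pulse_end_alt pvStart; rfl)

-- a positive wrapped lookup forces the index to be in range
theorem cond_lb (fd : List Int) (i : Int) (h : 0 < PySem.List.pyGetD fd i 0) :
    -(fd.length : Int) ≤ i := by
  by_contra hlt
  have hnone : PySem.List.pyGet? fd i = none := by
    rw [PySem.List.pyGet?_eq_none_iff]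
    intro hin
    exact hlt hin.1
  have : PySem.List.pyGetD fd i 0 = 0 := PySem.List.pyGetD_of_none fd i 0 hnone
  omega

-- D_'s range can start at max(s, -len) or at s: crossings only live in range
theorem D_mem_shift (fd : List Int) (s : Int) :
    (∃ i ∈ PySem.List.pyRange (s ⊔ -(fd.length : Int)) 0 1,
        0 < PySem.List.pyGetD fd i 0 ∧ PySem.List.pyGetD fd (i - 1) 0 < 0) ↔
      (∃ i ∈ PySem.List.pyRange s 0 1,
        0 < PySem.List.pyGetD fd i 0 ∧ PySem.List.pyGetD fd (i - 1) 0 < 0) := by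
  constructor <;> rintro ⟨i, hi, hc⟩ <;> refine ⟨i, ?_, hc⟩ <;>
    have hm := PySem.List.mem_pyRange_one.mp hi <;> rw [PySem.List.mem_pyRange_one]
  · omega
  · have := cond_lb fd i hc.1
    constructor
    · omega
    · exact hm.2

theorem D_iff (sp : Int) (dn dp : Option Int) (fd : List Int) :
    D_find_pulse_end sp dn dp fd ↔
      (pvStart sp dn dp < 0 ∧ ∃ i ∈ PySem.List.pyRange (pvStart sp dn dp) 0 1,
        0 < PySem.List.pyGetD fd i 0 ∧ PySem.List.pyGetD fd (i - 1) 0 < 0) := by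
  have h : ∀ s : Int,
      ((s < 0 ∧ ∃ i ∈ PySem.List.pyRange (s ⊔ -(fd.length : Int)) 0 1,
          0 < PySem.List.pyGetD fd i 0 ∧ PySem.List.pyGetD fd (i - 1) 0 < 0) ↔
        (s < 0 ∧ ∃ i ∈ PySem.List.pyRange s 0 1,
          0 < PySem.List.pyGetD fd i 0 ∧ PySem.List.pyGetD fd (i - 1) 0 < 0)) :=
    fun s => and_congr_right fun _ => D_mem_shift fd s
  rcases dp with _ | v <;> rcases dn with _ | w <;> exact h _

-- inside D_, A returns a negative wrapped index while B never does
theorem pv_tight (s : Int) (fd : List Int)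
    (hd : s < 0 ∧ ∃ i ∈ PySem.List.pyRange s 0 1,
        0 < PySem.List.pyGetD fd i 0 ∧ PySem.List.pyGetD fd (i - 1) 0 < 0) :
    pvScanA fd (PySem.List.pyRange s (fd.length : Int) 1)
      ≠ ((((List.range fd.length).filter (pvCross fd)).find? (fun j : Nat => decide (s ≤ (j : Int)))).map (fun j : Nat => (j : Int))) := by
  obtain ⟨hs, i, hi, hcross⟩ := hd
  rw [pvScanA_eq_find?]
  have hsplit : PySem.List.pyRange s (fd.length : Int) 1
      = PySem.List.pyRange s 0 1 ++ PySem.List.pyRange 0 (fd.length : Int) 1 :=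
    PySem.List.pyRange_one_append s 0 _ (le_of_lt hs) (by positivity)
  rw [hsplit, List.find?_append]
  have hsome : ((PySem.List.pyRange s 0 1).find? (pvCondI fd)).isSome = true := by
    rw [List.find?_isSome]
    exact ⟨i, hi, (pvCondI_true_iff fd i).mpr hcross⟩
  obtain ⟨i0, hi0⟩ := Option.isSome_iff_exists.mp hsome
  have hi0neg : i0 < 0 := (PySem.List.mem_pyRange_one.mp (List.mem_of_find?_eq_some hi0)).2
  rw [hi0, Option.some_or]
  intro heq
  cases hfind : ((List.range fd.length).filter (pvCross fd)).find? (fun j : Nat => decide (s ≤ (j : Int))) with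
  | none => rw [hfind] at heq; simp at heq
  | some j =>
      rw [hfind] at heq
      simp only [Option.map_some, Option.some.injEq] at heq
      have hj : (0 : Int) ≤ (j : Int) := Int.natCast_nonneg j
      omega

-- ===== VERDICT (by name: the statement is the Claim_ definition above) =====
theorem find_pulse_end_spec : Claim_unchanged_find_pulse_end := by
  intro sp dn dp fd _ _ hnD
  rw [A_eq, B_eq]
  exact pv_main (pvStart sp dn dp) fd (fun h => hnD ((D_iff sp dn dp fd).mpr h))

theorem find_pulse_end_changed : Claim_changed_find_pulse_end := by
  unfold Claim_changed_find_pulse_end; decide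

theorem find_pulse_end_tight : Claim_exact_find_pulse_end := by
  intro sp dn dp fd _ _ hD
  rw [A_eq, B_eq]
  exact pv_tight (pvStart sp dn dp) fd ((D_iff sp dn dp fd).mp hD)
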